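-- pv_equiv track=rewrite | github.com/Jess-Z8960/Python-practice | Codility Lesson 4 - Counting Elements.py | solution
-- ===== SOURCE A (Python) =====
-- def solution(X, A):
--     # write your code in Python 3.6
--     B = [B for B in range(1, X + 1)]
--     Bsum = sum(B)
--     Jump = 1
--     for x in range(0, len(A)):
--         if A[x] in B:
--             B.remove(A[x])
--             Bsum = sum(B)
--             Jump += 1
--
--     if Bsum == 0:
--         return Jump
--     else:
--         return -1
--
--     pass
-- ===== SOURCE B (Python) =====
-- def solution(X, A):
--     present = set(A)
--     if all(i in present for i in range(1, X + 1)):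
--         return max(X, 0) + 1
--     return -1
-- ===== Notes on version B (the rewrite author's own statement) =====
-- stated objective: faster
-- what changed: B builds a hash set of A once and checks every value 1..X for membership, instead of A's loop that repeatedly scans a list, removes found values and re-sums the remainder.
import Mathlib
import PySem

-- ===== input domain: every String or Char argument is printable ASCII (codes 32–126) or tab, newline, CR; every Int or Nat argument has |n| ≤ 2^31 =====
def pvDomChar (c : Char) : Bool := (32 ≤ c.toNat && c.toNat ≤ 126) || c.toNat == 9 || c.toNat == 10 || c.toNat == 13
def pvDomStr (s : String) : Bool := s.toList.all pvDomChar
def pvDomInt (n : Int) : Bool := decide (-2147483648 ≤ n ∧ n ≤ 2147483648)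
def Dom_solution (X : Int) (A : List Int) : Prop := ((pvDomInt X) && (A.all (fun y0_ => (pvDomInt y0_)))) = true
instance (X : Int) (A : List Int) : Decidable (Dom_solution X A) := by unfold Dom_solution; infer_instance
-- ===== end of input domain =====

-- B replaces A's remove-and-re-sum list loop by one membership check of every value 1..X
-- against a set of A built once (objective: faster, asymptotically).

-- ===== PORT A =====
-- one iteration of A's "for x in range(0, len(A))" body, applied to A[x];
-- state = (B, Bsum, Jump)
def solutionStep (st : List Int × Int × Int) (a : Int) : List Int × Int × Int :=
  if a ∈ st.1 then
    let B' := (PySem.List.remove? st.1 a).getD st.1   -- B.remove(A[x]); a ∈ B so remove? = some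
    (B', B'.sum, st.2.2 + 1)
  else st

def solution (X : Int) (A : List Int) : Int :=
  let B0 : List Int := (PySem.List.pyRange 1 (X + 1) 1).map (fun B => B)  -- [B for B in range(1, X+1)]
  let st := (PySem.List.pyRange 0 (A.length : Int) 1).foldl
    (fun st x => solutionStep st (PySem.List.pyGetD A x 0)) (B0, B0.sum, 1)
    -- A[x]: the index x is always in range here, so pyGetD is exact
  if st.2.1 = 0 then st.2.2 else -1

-- ===== PORT B =====
def solution_alt (X : Int) (A : List Int) : Int :=
  let present := PySem.Set.ofList A
  if (PySem.List.pyRange 1 (X + 1) 1).all (fun i => PySem.Set.contains present i) then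
    max X 0 + 1
  else -1

-- ===== PRECONDITION & SPEC =====
def Spec_solution (X : Int) (A : List Int) (out : Int) : Prop := out = solution_alt X A
instance (X : Int) (A : List Int) (out : Int) : Decidable (Spec_solution X A out) := by unfold Spec_solution; infer_instance

-- ===== CLAIM (what is proved, stated in full; the proofs are below) =====
def Claim_equal_solution : Prop := ∀ (X : Int) (A : List Int), Dom_solution X A → Spec_solution X A (solution X A)

-- ===== LEMMAS AND PROOFS =====

-- loop invariant: folding A's step over a list l starting from a duplicate-free B
-- filters out of B exactly the values occurring in l, keeps Bsum = sum, and adds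
-- the number of removed values to Jump.
lemma solution_loop_inv (l : List Int) : ∀ (R : List Int) (j : Int), R.Nodup →
    l.foldl solutionStep (R, R.sum, j)
      = ((R.filter (fun b => decide (b ∉ l))),
         (R.filter (fun b => decide (b ∉ l))).sum,
         j + ((R.length : Int) - ((R.filter (fun b => decide (b ∉ l))).length : Int))) := by
  induction l with
  | nil => intro R j _; simp
  | cons a t ih =>
    intro R j hR
    by_cases ha : a ∈ R
    · have herase : PySem.List.remove? R a = some (R.erase a) :=
        PySem.List.remove?_eq_some_erase R a ha
      have hEf : R.erase a = R.filter (fun b => decide (b ≠ a)) := by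
        simpa using hR.erase_eq_filter a
      have hfil : (R.erase a).filter (fun b => decide (b ∉ t))
          = R.filter (fun b => decide (b ∉ a :: t)) := by
        rw [hEf, List.filter_filter]
        apply List.filter_congr
        intro b _
        by_cases hb1 : b = a <;> by_cases hb2 : b ∈ t <;> simp [hb1, hb2]
      have hlen : (R.erase a).length + 1 = R.length := by
        simpa using List.length_erase_add_one ha
      have hle : (R.filter (fun b => decide (b ∉ a :: t))).length ≤ (R.erase a).length := by
        rw [← hfil]; exact List.length_filter_le _ _
      simp only [List.foldl_cons, solutionStep, ha, if_pos, herase, Option.getD_some]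
      rw [ih (R.erase a) (j + 1) (hR.erase a), hfil]
      simp only [Prod.mk.injEq]
      exact ⟨trivial, trivial, by omega⟩
    · have hfil : R.filter (fun b => decide (b ∉ t))
          = R.filter (fun b => decide (b ∉ a :: t)) := by
        apply List.filter_congr
        intro b hb
        have hba : b ≠ a := fun h => ha (h ▸ hb)
        by_cases hb2 : b ∈ t <;> simp [hb2, hba]
      simp only [List.foldl_cons, solutionStep, ha, if_neg, not_false_iff]
      rw [ih R j hR, hfil]

-- a list of integers that are all at least 1 sums to at least its length
lemma sum_ge_length (l : List Int) (h : ∀ b ∈ l, 1 ≤ b) : (l.length : Int) ≤ l.sum := by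
  induction l with
  | nil => simp
  | cons a t ih =>
    have ha := h a (by simp)
    have ht := ih (fun b hb => h b (by simp [hb]))
    simp only [List.sum_cons, List.length_cons]
    push_cast
    omega

-- ===== VERDICT (by name: the statement is the Claim_ definition above) =====
theorem solution_spec : Claim_equal_solution := by
  intro X A _
  unfold Spec_solution solution solution_alt
  set B0 : List Int := PySem.List.pyRange 1 (X + 1) 1 with hB0
  have hmapid : B0.map (fun B => B) = B0 := by simp
  have hnodup : B0.Nodup := PySem.List.nodup_pyRange_one 1 (X + 1)
  have hfold : (PySem.List.pyRange 0 (A.length : Int) 1).foldl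
      (fun st x => solutionStep st (PySem.List.pyGetD A x 0)) (B0, B0.sum, 1)
      = A.foldl solutionStep (B0, B0.sum, 1) := by
    exact PySem.List.foldl_pyRange_zero_pyGetD' A 0 solutionStep (B0, B0.sum, 1)
  have hinv := solution_loop_inv A B0 1 hnodup
  set F : List Int := B0.filter (fun b => decide (b ∉ A)) with hF
  have hpos : ∀ b ∈ F, 1 ≤ b := by
    intro b hb
    have hb0 : b ∈ B0 := List.mem_of_mem_filter hb
    have := (PySem.List.mem_pyRange_one (a := 1) (b := X + 1) (x := b)).1 hb0
    omega
  have hall : ((PySem.List.pyRange 1 (X + 1) 1).all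
      (fun i => PySem.Set.contains (PySem.Set.ofList A) i) = true) ↔ F = [] := by
    rw [List.all_eq_true, hF, List.filter_eq_nil_iff]
    constructor
    · intro h b hb
      have hc := h b hb
      simp only [PySem.Set.contains_iff, PySem.Set.mem_ofList] at hc
      simp [hc]
    · intro h i hi
      have hc := h i hi
      simpa using hc
  simp only [hmapid, hfold, hinv]
  by_cases hFe : F = []
  · rw [if_pos (hall.2 hFe)]
    have hlen : B0.length = X.toNat := by
      rw [hB0, PySem.List.length_pyRange_one]; congr 1; omega
    simp only [hFe, List.sum_nil, List.length_nil, hlen, if_pos]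
    omega
  · have h0 : 0 < F.length := List.length_pos_of_ne_nil hFe
    have hsum : F.sum ≠ 0 := by
      have := sum_ge_length F hpos
      omega
    rw [if_neg (fun h => hFe (hall.1 h))]
    simp only [if_neg hsum]
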